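-- pv_equiv track=rewrite | github.com/eric-wieser/axis-metadata | axis_metadata.py | same_ignoring_nones
-- ===== SOURCE A (Python) =====
-- def same_ignoring_nones(ts):
-- 	seen = None
-- 	for t in ts:
-- 		if t is not None:
-- 			if seen is not None:
-- 				if seen != t:
-- 					raise ValueError
-- 			else:
-- 				seen = t
--
-- 	return seen
-- ===== SOURCE B (Python) =====
-- def same_ignoring_nones(ts):
--     vals = [t for t in ts if t is not None]
--     if not vals:
--         return None
--     first = vals[0]
--     for t in vals[1:]:
--         if first != t:
--             raise ValueError
--     return first
-- ===== Notes on version B (the rewrite author's own statement) =====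
-- stated objective: simpler
-- what changed: Replaces the single interleaved loop carrying an Optional 'seen' state with a filter pass collecting the non-None values followed by a plain comparison scan against the first value.
import Mathlib
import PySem

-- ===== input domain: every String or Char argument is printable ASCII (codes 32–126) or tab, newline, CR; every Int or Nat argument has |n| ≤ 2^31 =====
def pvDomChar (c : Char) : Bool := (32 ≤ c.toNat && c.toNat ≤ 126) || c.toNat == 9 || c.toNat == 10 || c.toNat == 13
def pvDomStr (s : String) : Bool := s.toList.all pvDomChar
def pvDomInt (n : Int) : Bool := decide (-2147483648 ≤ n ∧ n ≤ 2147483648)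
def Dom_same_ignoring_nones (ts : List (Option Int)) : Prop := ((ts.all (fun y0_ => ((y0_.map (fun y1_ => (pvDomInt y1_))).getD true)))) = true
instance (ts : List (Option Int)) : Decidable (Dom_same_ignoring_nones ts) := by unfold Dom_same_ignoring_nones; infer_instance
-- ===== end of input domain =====

-- B splits A's single loop with an Optional 'seen' accumulator into a filter pass plus a
-- comparison scan against the first collected value (objective: simpler).

-- ===== PORT A =====
-- A's for-loop over ts with state 'seen'; 'none' result = the ValueError raise (outside Pre_).
def pyLoopA : List (Option Int) → Option Int → Option (Option Int)
  | [], seen => some seen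
  | t :: rest, seen =>
    match t with
    | none => pyLoopA rest seen
    | some v =>
      match seen with
      | some s => if s ≠ v then none else pyLoopA rest (some s)
      | none => pyLoopA rest (some v)

-- getD only fires on raising inputs, which Pre_ excludes.
def same_ignoring_nones (ts : List (Option Int)) : Option Int :=
  (pyLoopA ts none).getD none

-- ===== PORT B =====
-- B's 'for t in vals[1:]' comparison scan; 'none' result = the ValueError raise (outside Pre_).
def pyScanB (first : Int) : List Int → Option (Option Int)
  | [] => some (some first)
  | t :: rest => if first ≠ t then none else pyScanB first rest

def same_ignoring_nones_alt (ts : List (Option Int)) : Option Int :=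
  let vals := ts.filterMap id
  match vals with
  | [] => none
  | first :: rest => (pyScanB first rest).getD none

-- ===== PRECONDITION & SPEC =====
-- Pre_ excludes exactly the inputs with two distinct non-None values, on which the Python A
-- (and B) raises ValueError.
def Pre_same_ignoring_nones (ts : List (Option Int)) : Prop :=
  ∀ a ∈ ts.filterMap id, ∀ b ∈ ts.filterMap id, a = b
instance (ts : List (Option Int)) : Decidable (Pre_same_ignoring_nones ts) := by
  unfold Pre_same_ignoring_nones; infer_instance

def pvWitness_same_ignoring_nones : List (Option Int) := [none, some 3, none, some 3]

def Spec_same_ignoring_nones (ts : List (Option Int)) (out : Option Int) : Prop := out = same_ignoring_nones_alt ts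
instance (ts : List (Option Int)) (out : Option Int) : Decidable (Spec_same_ignoring_nones ts out) := by unfold Spec_same_ignoring_nones; infer_instance

-- ===== CLAIM (what is proved, stated in full; the proofs are below) =====
def Claim_equal_same_ignoring_nones : Prop := ∀ (ts : List (Option Int)), Dom_same_ignoring_nones ts → Pre_same_ignoring_nones ts → Spec_same_ignoring_nones ts (same_ignoring_nones ts)

-- ===== LEMMAS AND PROOFS =====

theorem pyLoopA_some (ts : List (Option Int)) (s : Int)
    (h : ∀ v : Int, some v ∈ ts → v = s) : pyLoopA ts (some s) = some (some s) := by
  induction ts with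
  | nil => rfl
  | cons t rest ih =>
    cases t with
    | none =>
      simp only [pyLoopA]
      exact ih (fun v hv => h v (List.mem_cons_of_mem _ hv))
    | some v =>
      have hv : v = s := h v (List.mem_cons_self ..)
      simp only [pyLoopA, hv, ne_eq, not_true_eq_false, if_false]
      exact ih (fun w hw => h w (List.mem_cons_of_mem _ hw))

theorem pyLoopA_eq_head (ts : List (Option Int))
    (h : ∀ a b : Int, some a ∈ ts → some b ∈ ts → a = b) :
    pyLoopA ts none = some (ts.filterMap id).head? := by
  induction ts with
  | nil => rfl
  | cons t rest ih =>
    cases t with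
    | none =>
      simp only [pyLoopA, List.filterMap_cons, id]
      exact ih (fun a b ha hb => h a b (List.mem_cons_of_mem _ ha) (List.mem_cons_of_mem _ hb))
    | some v =>
      simp only [pyLoopA, List.filterMap_cons, id, List.head?_cons]
      exact pyLoopA_some rest v
        (fun w hw => h w v (List.mem_cons_of_mem _ hw) (List.mem_cons_self ..))

theorem pyScanB_all (first : Int) (rest : List Int)
    (h : ∀ t ∈ rest, first = t) : pyScanB first rest = some (some first) := by
  induction rest with
  | nil => rfl
  | cons t r ih =>
    have ht : first = t := h t (List.mem_cons_self ..)
    subst ht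
    simp only [pyScanB, ne_eq, not_true_eq_false, if_false]
    exact ih (fun w hw => h w (List.mem_cons_of_mem _ hw))

-- ===== VERDICT (by name: the statement is the Claim_ definition above) =====
theorem same_ignoring_nones_spec : Claim_equal_same_ignoring_nones := by
  intro ts _ hpre
  unfold Spec_same_ignoring_nones same_ignoring_nones same_ignoring_nones_alt
  have h2 : ∀ a b : Int, some a ∈ ts → some b ∈ ts → a = b := fun a b ha hb =>
    hpre a (List.mem_filterMap.2 ⟨some a, ha, rfl⟩) b (List.mem_filterMap.2 ⟨some b, hb, rfl⟩)
  rw [pyLoopA_eq_head ts h2]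
  cases hv : ts.filterMap id with
  | nil => simp
  | cons first rest =>
    have : pyScanB first rest = some (some first) := by
      apply pyScanB_all
      intro t ht
      exact hpre first (hv ▸ List.mem_cons_self ..) t (hv ▸ List.mem_cons_of_mem _ ht)
    simp [this]
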